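-- pv_equiv track=rewrite | github.com/racullen403/Profile | LeetCode/_879_ProfitableSchemes.py | find_profitable_schemes
-- ===== SOURCE A (Python) =====
-- def find_profitable_schemes(n, minProfit, group, profit):
--     i = len(group)
--     profitable_schemes = 0
--     schemes = [(group[j], profit[j], j) for j in range(i)]
--     while schemes:
--         scheme = schemes.pop()
--         if scheme[0] <= n:
--             for j in range(scheme[2] + 1, i):
--                 schemes.append((scheme[0] + group[j], scheme[1] + profit[j], j))
--             if scheme[1] >= minProfit:
--                 profitable_schemes += 1
--     return profitable_schemes
-- ===== SOURCE B (Python) =====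
-- def find_profitable_schemes(n, minProfit, group, profit):
--     schemes = [(0, 0)]
--     for g, p in zip(group, profit):
--         schemes += [(sg + g, sp + p) for sg, sp in schemes if sg + g <= n]
--     return sum(1 for sg, sp in schemes[1:] if sp >= minProfit)
-- ===== Notes on version B (the rewrite author's own statement) =====
-- stated objective: simpler
-- what changed: A's explicit worklist stack of (members, profit, last-index) triples popped and re-expanded in DFS order is replaced by a single left-to-right pass over zip(group, profit) that grows one flat list of feasible partial schemes (layered breadth-first enumeration) and counts the profitable non-empty ones at the end.
import Mathlib
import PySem

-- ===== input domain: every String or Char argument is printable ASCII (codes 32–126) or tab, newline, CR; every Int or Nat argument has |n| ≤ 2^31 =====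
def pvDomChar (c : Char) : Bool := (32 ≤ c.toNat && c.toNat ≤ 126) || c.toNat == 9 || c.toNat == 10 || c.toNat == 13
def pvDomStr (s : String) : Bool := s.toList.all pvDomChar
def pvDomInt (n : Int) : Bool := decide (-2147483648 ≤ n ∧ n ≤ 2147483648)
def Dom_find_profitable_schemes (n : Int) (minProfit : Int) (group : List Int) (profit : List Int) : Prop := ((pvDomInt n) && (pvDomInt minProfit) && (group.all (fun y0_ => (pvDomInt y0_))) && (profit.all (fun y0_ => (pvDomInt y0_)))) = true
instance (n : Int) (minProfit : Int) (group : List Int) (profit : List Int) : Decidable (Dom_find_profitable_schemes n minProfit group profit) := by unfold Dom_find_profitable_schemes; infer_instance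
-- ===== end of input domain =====

-- B replaces A's explicit DFS worklist of (members, profit, last-index) triples by one left-to-right
-- pass growing a flat list of feasible partial schemes; same feasible-scheme search space, simpler code.

-- ===== PORT A =====
-- two lemmas cited by the ports' decreasing_by: drop of a range, and the weight of the items
-- pushed for a popped index j is strictly below the popped item's weight 2^(m-j)
theorem pvDropRange (n i : Nat) : (List.range n).drop i = List.range' i (n - i) := by
  simp [List.range_eq_range', List.drop_range']

theorem pvPowSum (m : Nat) : ∀ t a : Nat, a + t = m →
    ((List.range' a t).map (fun k => (2:Nat) ^ (m - k))).sum = 2 ^ (t + 1) - 2 := by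
  intro t
  induction t with
  | zero => intro a h; simp
  | succ t ih =>
    intro a h
    rw [List.range'_succ]
    simp only [List.map_cons, List.sum_cons, ih (a+1) (by omega)]
    have hma : m - a = t + 1 := by omega
    rw [hma]
    have h2 : (2:Nat) ^ 1 ≤ 2 ^ (t + 1) := Nat.pow_le_pow_right (by omega) (by omega)
    have h3 : (2:Nat) ^ (t + 1 + 1) = 2 ^ (t + 1) * 2 := pow_succ 2 (t+1)
    simp only [pow_one] at h2
    omega

theorem pvPowLt (m j : Nat) :
    ((((List.range m).drop (j+1)).map (fun k => (2:Nat) ^ (m - k))).sum) < 2 ^ (m - j) := by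
  rw [pvDropRange]
  by_cases h : j + 1 ≤ m
  · rw [pvPowSum m (m - (j+1)) (j+1) (by omega)]
    have hmj : m - j = (m - (j + 1)) + 1 := by omega
    rw [hmj]
    have h2 : (2:Nat) ^ 1 ≤ 2 ^ ((m - (j+1)) + 1) := Nat.pow_le_pow_right (by omega) (by omega)
    simp only [pow_one] at h2
    omega
  · have h0 : m - (j + 1) = 0 := by omega
    rw [h0]
    simp

-- A's while-loop: the Python stack's top is the HEAD of this list (pop = uncons); the items
-- appended for indices j+1..m-1 arrive reversed in front, so the largest index is popped next, as in Python.
def pvLoopA (n minProfit : Int) (group profit : List Int) :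
    List (Int × Int × Nat) → Int → Int
  | [], acc => acc
  | (g, p, j) :: rest, acc =>
    if g ≤ n then
      pvLoopA n minProfit group profit
        (((((List.range group.length).drop (j+1)).map
            (fun k => (g + group.getD k 0, p + profit.getD k 0, k))).reverse) ++ rest)
        (acc + if minProfit ≤ p then 1 else 0)
    else
      pvLoopA n minProfit group profit rest acc
  termination_by stack _ => (stack.map (fun s => (2:Nat) ^ (group.length - s.2.2))).sum
  decreasing_by
  · simp only [List.map_append, List.sum_append, List.map_reverse, List.sum_reverse,
      List.map_map, List.map_cons, List.sum_cons, Function.comp_def]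
    have := pvPowLt group.length j
    omega
  · simp only [List.map_cons, List.sum_cons]
    have : 0 < (2:Nat) ^ (group.length - j) := Nat.two_pow_pos _
    omega

def find_profitable_schemes (n : Int) (minProfit : Int) (group : List Int) (profit : List Int) : Int :=
  pvLoopA n minProfit group profit
    (((List.range group.length).map (fun j => (group.getD j 0, profit.getD j 0, j))).reverse) 0

-- ===== PORT B =====
-- one step of B's loop body: schemes += [(sg+g, sp+p) for sg, sp in schemes if sg+g <= n]
def pvStep (n : Int) (schemes : List (Int × Int)) (it : Int × Int) : List (Int × Int) :=
  schemes ++ (schemes.filter (fun s => s.1 + it.1 ≤ n)).map (fun s => (s.1 + it.1, s.2 + it.2))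

def find_profitable_schemes_alt (n : Int) (minProfit : Int) (group : List Int) (profit : List Int) : Int :=
  (((((group.zip profit).foldl (pvStep n) [(0, 0)]).drop 1).filter
      (fun s => minProfit ≤ s.2)).length : Int)

-- ===== PRECONDITION & SPEC =====
-- A evaluates profit[j] for every j < len(group), so it raises IndexError exactly when
-- profit is shorter than group; Pre_ excludes only those raising inputs.
def Pre_find_profitable_schemes (n : Int) (minProfit : Int) (group : List Int) (profit : List Int) : Prop :=
  group.length ≤ profit.length
instance (n : Int) (minProfit : Int) (group : List Int) (profit : List Int) : Decidable (Pre_find_profitable_schemes n minProfit group profit) := by unfold Pre_find_profitable_schemes; infer_instance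

def pvWitness_find_profitable_schemes : Int × Int × List Int × List Int := (2, 1, [1, 2], [1, 3])

def Spec_find_profitable_schemes (n : Int) (minProfit : Int) (group : List Int) (profit : List Int) (out : Int) : Prop := out = find_profitable_schemes_alt n minProfit group profit
instance (n : Int) (minProfit : Int) (group : List Int) (profit : List Int) (out : Int) : Decidable (Spec_find_profitable_schemes n minProfit group profit out) := by unfold Spec_find_profitable_schemes; infer_instance

-- ===== CLAIM (what is proved, stated in full; the proofs are below) =====
def Claim_equal_find_profitable_schemes : Prop := ∀ (n : Int) (minProfit : Int) (group : List Int) (profit : List Int), Dom_find_profitable_schemes n minProfit group profit → Pre_find_profitable_schemes n minProfit group profit → Spec_find_profitable_schemes n minProfit group profit (find_profitable_schemes n minProfit group profit)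

-- ===== LEMMAS AND PROOFS =====

-- the value A's loop eventually accrues for one stack item (g, p, j): the number of feasible
-- profitable schemes extending (g, p) by indices > j (counting (g, p) itself if profitable)
def pvCnt (n minProfit : Int) (group profit : List Int) (g p : Int) (j : Nat) : Int :=
  if g ≤ n then
    (if minProfit ≤ p then 1 else 0) +
    ((((List.range group.length).drop (j+1)).attach).map
      (fun k => pvCnt n minProfit group profit (g + group.getD k.1 0) (p + profit.getD k.1 0) k.1)).sum
  else 0
  termination_by group.length - j
  decreasing_by
    have hk : k.1 ∈ List.range' (j+1) (group.length - (j+1)) := by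
      rw [← pvDropRange]; exact k.2
    have := List.mem_range'_1.mp hk
    omega

-- attach-free unfolding of pvCnt
theorem pvCnt_unfold (n minProfit : Int) (group profit : List Int) (g p : Int) (j : Nat) :
    pvCnt n minProfit group profit g p j =
      if g ≤ n then
        (if minProfit ≤ p then 1 else 0) +
        (((List.range group.length).drop (j+1)).map
          (fun k => pvCnt n minProfit group profit (g + group.getD k 0) (p + profit.getD k 0) k)).sum
      else 0 := by
  rw [pvCnt.eq_def]
  simp only [List.map_subtype, List.unattach_attach]

-- A's loop equals the accumulator plus the pvCnt-weight of the remaining stack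
theorem pvLoopA_eq (n minProfit : Int) (group profit : List Int) :
    ∀ stack acc, pvLoopA n minProfit group profit stack acc =
      acc + (stack.map (fun s => pvCnt n minProfit group profit s.1 s.2.1 s.2.2)).sum := by
  intro stack acc
  fun_induction pvLoopA n minProfit group profit stack acc with
  | case1 => simp
  | case2 g p j rest acc hgn ih =>
    simp only [dite_eq_ite] at ih
    rw [ih]
    simp only [List.map_cons, List.sum_cons, List.map_append, List.sum_append,
      List.map_reverse, List.sum_reverse, List.map_map, Function.comp_def]
    rw [pvCnt_unfold]
    rw [if_pos hgn]
    ring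
  | case3 g p j rest acc hgn ih =>
    rw [ih]
    simp only [List.map_cons, List.sum_cons]
    rw [pvCnt_unfold, if_neg hgn]
    ring

-- generic: sum over L plus sum over the filtered sublist, as one sum over L
theorem pvSumFilter {α : Type} (c : α → Bool) (f g : α → Int) :
    ∀ L : List α, (L.map f).sum + ((L.filter c).map g).sum =
      (L.map (fun s => f s + if c s then g s else 0)).sum := by
  intro L
  induction L with
  | nil => simp
  | cons x xs ih =>
    by_cases hx : c x
    · simp only [List.map_cons, List.sum_cons, List.filter_cons, hx, if_pos]
      rw [← ih]; ring
    · rw [Bool.not_eq_true] at hx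
      simp only [List.map_cons, List.sum_cons, List.filter_cons, hx, Bool.false_eq_true, if_false]
      rw [← ih]; ring

-- B's fold over the items with indices a..m-1 : the profitable count of the final list equals
-- the pvCnt-weight of every scheme already in L
theorem pvFoldB (n minProfit : Int) (group profit : List Int) :
    ∀ (len a : Nat), a + len = group.length → ∀ L : List (Int × Int),
      ((((List.range' a len).map (fun j => (group.getD j 0, profit.getD j 0))).foldl (pvStep n) L).map
          (fun s => if minProfit ≤ s.2 then (1:Int) else 0)).sum =
      (L.map (fun s => (if minProfit ≤ s.2 then (1:Int) else 0) +
        ((List.range' a len).map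
          (fun k => pvCnt n minProfit group profit (s.1 + group.getD k 0) (s.2 + profit.getD k 0) k)).sum)).sum := by
  intro len
  induction len with
  | zero => intro a h L; simp
  | succ len ih =>
    intro a h L
    rw [List.range'_succ]
    simp only [List.map_cons, List.foldl_cons]
    rw [ih (a+1) (by omega) (pvStep n L (group.getD a 0, profit.getD a 0))]
    unfold pvStep
    rw [List.map_append, List.sum_append, List.map_map, pvSumFilter]
    congr 1
    apply List.map_congr_left
    intro s _
    simp only [Function.comp_def]
    rw [pvCnt_unfold, pvDropRange]
    have hdrop : group.length - (a + 1) = len := by omega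
    rw [hdrop]
    by_cases hc : s.1 + group.getD a 0 ≤ n
    · simp only [hc, decide_true, if_pos, List.sum_cons]
      ring
    · simp only [hc, decide_false, Bool.false_eq_true, if_false, List.sum_cons]
      ring

-- zip(group, profit) item by item, given that profit is long enough
theorem pvZipEq (group profit : List Int) (h : group.length ≤ profit.length) :
    group.zip profit = (List.range group.length).map (fun j => (group.getD j 0, profit.getD j 0)) := by
  apply List.ext_getElem
  · simp [List.length_zip]; omega
  · intro i h1 h2
    have hi : i < group.length := by simpa using h2
    have hip : i < profit.length := by omega
    simp [List.getElem_zip, hi, hip]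

-- B's fold keeps the seed scheme (0,0) at the head of the list
theorem pvFoldHead (n : Int) :
    ∀ (xs : List (Int × Int)) (x0 : Int × Int) (tl : List (Int × Int)),
      ∃ u, List.foldl (pvStep n) (x0 :: tl) xs = x0 :: u := by
  intro xs
  induction xs with
  | nil => intro x0 tl; exact ⟨tl, rfl⟩
  | cons x xs ih =>
    intro x0 tl
    simp only [List.foldl_cons]
    have hstep : pvStep n (x0 :: tl) x =
        x0 :: (tl ++ ((x0 :: tl).filter (fun s => s.1 + x.1 ≤ n)).map (fun s => (s.1 + x.1, s.2 + x.2))) := by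
      simp [pvStep]
    rw [hstep]
    exact ih x0 _

-- an Int-valued filter length is the sum of 0/1 indicators
theorem pvCountI (minProfit : Int) :
    ∀ L : List (Int × Int), ((L.filter (fun s => minProfit ≤ s.2)).length : Int) =
      (L.map (fun s => if minProfit ≤ s.2 then (1:Int) else 0)).sum := by
  intro L
  induction L with
  | nil => simp
  | cons x xs ih =>
    by_cases hx : minProfit ≤ x.2
    · simp [hx, ih]; ring
    · simp [hx, ih]

theorem final_eq (n minProfit : Int) (group profit : List Int)
    (h : group.length ≤ profit.length) :
    find_profitable_schemes n minProfit group profit =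
      find_profitable_schemes_alt n minProfit group profit := by
  unfold find_profitable_schemes find_profitable_schemes_alt
  -- A's side: sum of pvCnt over all singleton seeds
  rw [pvLoopA_eq]
  simp only [List.map_reverse, List.sum_reverse, List.map_map, Function.comp_def, zero_add]
  -- B's side
  rw [pvZipEq group profit h]
  obtain ⟨u, hu⟩ := pvFoldHead n ((List.range group.length).map (fun j => (group.getD j 0, profit.getD j 0))) (0, 0) []
  have hfold := pvFoldB n minProfit group profit group.length 0 (by omega) [(0, 0)]
  rw [List.range_eq_range'] at *
  rw [hu] at hfold
  simp only [List.map_cons, List.sum_cons, List.map_nil, List.sum_nil, zero_add, add_zero] at hfold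
  rw [hu]
  simp only [List.drop_succ_cons, List.drop_zero]
  rw [pvCountI minProfit u]
  omega

-- ===== VERDICT (by name: the statement is the Claim_ definition above) =====
theorem find_profitable_schemes_spec : Claim_equal_find_profitable_schemes := by
  intro n minProfit group profit _ hpre
  unfold Spec_find_profitable_schemes
  exact final_eq n minProfit group profit hpre
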